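-- pv_equiv track=rewrite | github.com/lkwq007/leetcode-py | 2269-Find-the-K-Beauty-of-a-Number.py | divisorSubstrings
-- ===== SOURCE A (Python) =====
-- def divisorSubstrings(num: int, k: int) -> int:
--     lst=str(num)
--     ret=0
--     for i in range(len(lst)-k+1):
--         cur=int(lst[i:i+k])
--         if cur!=0 and num%cur==0:
--             ret+=1
--     return ret
-- ===== SOURCE B (Python) =====
-- def divisorSubstrings(num: int, k: int) -> int:
--     digits = [int(c) for c in str(num)]
--     n = len(digits)
--     if k > n:
--         return 0
--     cur = 0
--     for d in digits[:k]:
--         cur = cur * 10 + d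
--     p = 10 ** (k - 1)
--     ret = 1 if cur != 0 and num % cur == 0 else 0
--     for i in range(k, n):
--         cur = (cur - digits[i - k] * p) * 10 + digits[i]
--         if cur != 0 and num % cur == 0:
--             ret += 1
--     return ret
-- ===== Notes on version B (the rewrite author's own statement) =====
-- stated objective: alternative
-- what changed: Replaces the per-window string slice + int() reparse with a single incremental sliding window that maintains the running k-digit value arithmetically (drop leading digit, append next).
-- outside the precondition, e.g. on divisorSubstrings(-12, 2): A returns 2, B raises ValueError; on divisorSubstrings(5, 0): A raises ValueError, B returns 0
import Mathlib
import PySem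

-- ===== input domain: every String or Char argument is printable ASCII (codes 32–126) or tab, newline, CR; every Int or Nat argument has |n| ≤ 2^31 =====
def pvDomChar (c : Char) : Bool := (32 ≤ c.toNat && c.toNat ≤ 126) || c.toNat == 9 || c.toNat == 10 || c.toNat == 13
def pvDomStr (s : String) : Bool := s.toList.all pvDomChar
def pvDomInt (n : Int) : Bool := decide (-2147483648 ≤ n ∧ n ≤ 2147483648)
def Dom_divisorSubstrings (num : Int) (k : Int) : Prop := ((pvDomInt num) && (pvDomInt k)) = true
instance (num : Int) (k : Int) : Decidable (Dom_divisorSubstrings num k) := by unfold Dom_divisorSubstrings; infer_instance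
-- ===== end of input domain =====

-- B replaces A's per-window string slice + int() reparse with one incremental sliding
-- window that maintains the running k-digit value arithmetically (alternative algorithm,
-- same exact return value on the stated domain).

-- ===== PORT A =====
def divisorSubstrings (num : Int) (k : Int) : Int :=
  let lst := PySem.Int.toStr num
  (PySem.List.pyRange 0 (PySem.Str.len lst - k + 1) 1).foldl
    (fun ret i =>
      -- cur = int(lst[i:i+k]); int() raising ValueError is excluded by Pre_
      match PySem.Int.ofStr? (PySem.Str.slice lst (some i) (some (i + k))) with
      | some cur => if cur ≠ 0 ∧ PySem.Int.mod num cur = 0 then ret + 1 else ret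
      | none => ret) 0

-- ===== PORT B =====
def divisorSubstrings_alt (num : Int) (k : Int) : Int :=
  -- int(c) raising ValueError (e.g. on '-') is excluded by Pre_
  let digits := (PySem.Int.toStr num).toList.map
    (fun c => (PySem.Int.ofStr? (String.ofList [c])).getD 0)
  let n : Int := (digits.length : Int)
  if k > n then 0
  else
    let cur0 := (PySem.List.slice digits none (some k)).foldl (fun a d => a * 10 + d) 0
    let p : Int := 10 ^ (k - 1).toNat   -- 10 ** (k - 1); 1 ≤ k under Pre_
    let ret0 : Int := if cur0 ≠ 0 ∧ PySem.Int.mod num cur0 = 0 then 1 else 0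
    ((PySem.List.pyRange k n 1).foldl
      (fun (st : Int × Int) i =>
        let cur := (st.2 - (PySem.List.pyGet? digits (i - k)).getD 0 * p) * 10 +
          (PySem.List.pyGet? digits i).getD 0
        (if cur ≠ 0 ∧ PySem.Int.mod num cur = 0 then st.1 + 1 else st.1, cur))
      (ret0, cur0)).1

-- ===== PRECONDITION & SPEC =====
-- Pre_ excludes negative num (A slices str(num) through the '-' sign, parsing windows as
-- negative integers — a corner no specification covers; B raises ValueError there) and
-- k ≤ 0 (A raises ValueError on int('')).
def Pre_divisorSubstrings (num : Int) (k : Int) : Prop := 0 ≤ num ∧ 1 ≤ k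
instance (num : Int) (k : Int) : Decidable (Pre_divisorSubstrings num k) := by
  unfold Pre_divisorSubstrings; infer_instance

def pvWitness_divisorSubstrings : Int × Int := (100, 1)

def Spec_divisorSubstrings (num : Int) (k : Int) (out : Int) : Prop := out = divisorSubstrings_alt num k
instance (num : Int) (k : Int) (out : Int) : Decidable (Spec_divisorSubstrings num k out) := by
  unfold Spec_divisorSubstrings; infer_instance

-- ===== CLAIM (what is proved, stated in full; the proofs are below) =====
def Claim_equal_divisorSubstrings : Prop := ∀ (num : Int) (k : Int), Dom_divisorSubstrings num k → Pre_divisorSubstrings num k → Spec_divisorSubstrings num k (divisorSubstrings num k)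

-- ===== LEMMAS AND PROOFS =====

-- Clone of the (inaccessible) digit-scanning worker inside PySem.Int.ofChars?.
def pvGo : List Char → Bool → Nat → Option Nat
  | [], afterDigit, acc => if afterDigit = true then some acc else none
  | c :: rest, afterDigit, acc =>
    if c.isDigit = true then pvGo rest true (acc * 10 + (c.toNat - '0'.toNat))
    else
      if c = '_' ∧ afterDigit = true then
        match rest with
        | d :: _ => if d.isDigit = true then pvGo rest false acc else none
        | [] => none
      else none

def pvVN (acc : Nat) (l : List Char) : Nat := l.foldl (fun a c => a * 10 + (c.toNat - '0'.toNat)) acc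

def pvDval (c : Char) : Int := (c.toNat : Int) - 48

def pvVI (l : List Char) : Int := l.foldl (fun a c => a * 10 + pvDval c) 0

def pvWin (s : List Char) (K j : Nat) : List Char := (s.drop j).take K

def pvP (num : Int) (s : List Char) (K : Nat) (j : Nat) : Bool :=
  decide (pvVI (pvWin s K j) ≠ 0 ∧ PySem.Int.mod num (pvVI (pvWin s K j)) = 0)

theorem pvDigitGe48 (c : Char) (h : c.isDigit = true) : 48 ≤ c.toNat := by
  simp [Char.isDigit, UInt32.le_iff_toNat_le] at h
  exact h.1

theorem pvGetCongr (s : List Char) {i j : Nat} (h : i = j) (hi : i < s.length)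
    (hj : j < s.length) : s[i]'hi = s[j]'hj := by subst h; rfl

theorem pvDigitNotSpace (x : Char) (h : x.isDigit = true) : PySem.Int.isIntSpace x = false := by
  simp [Char.isDigit, UInt32.le_iff_toNat_le] at h
  simp [PySem.Int.isIntSpace, Char.ext_iff, ← UInt32.toNat_inj]
  omega

theorem pvDropWhileAllFalse {p : Char → Bool} (l : List Char) (h : ∀ x ∈ l, p x = false) :
    List.dropWhile p l = l := by
  cases l with
  | nil => rfl
  | cons c r => simp [h c (by simp)]

theorem pvGoSpec (ds : List Char) (acc : Nat) (hd : ∀ c ∈ ds, c.isDigit = true) :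
    pvGo ds true acc = some (pvVN acc ds) := by
  induction ds generalizing acc with
  | nil => rfl
  | cons c rest ih =>
    simp only [pvGo, if_pos (hd c (by simp))]
    exact ih _ (fun x hx => hd x (by simp [hx]))

theorem pvOfCharsDigits (c : Char) (rest : List Char) (hd : ∀ x ∈ c :: rest, x.isDigit = true) :
    PySem.Int.ofChars? (c :: rest) = some ((pvVN 0 (c :: rest) : Nat) : Int) := by
  have hsp : ∀ x ∈ c :: rest, PySem.Int.isIntSpace x = false :=
    fun x hx => pvDigitNotSpace x (hd x hx)
  have h1 : List.dropWhile PySem.Int.isIntSpace (c :: rest) = c :: rest := pvDropWhileAllFalse _ hsp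
  have h2 : List.dropWhile PySem.Int.isIntSpace (c :: rest).reverse = (c :: rest).reverse := by
    apply pvDropWhileAllFalse
    intro x hx
    exact hsp x (by rw [List.mem_reverse] at hx; exact hx)
  simp only [PySem.Int.ofChars?, h1, h2, List.reverse_reverse]
  split
  · rename_i hmatch
    exact absurd (hd '-' (by rw [hmatch]; simp)) (by decide)
  · rename_i hmatch
    exact absurd (hd '+' (by rw [hmatch]; simp)) (by decide)
  · rename_i cs hm1 hm2
    clear hm1 hm2
    refine Eq.trans (b := Option.map (fun n => n) (do
      let a ← pvGo (c :: rest) false 0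
      pure ((a : Nat) : Int))) ?hA ?hB
    case hB =>
      simp only [pvGo, if_pos (hd c (by simp))]
      rw [pvGoSpec rest _ (fun x hx => hd x (by simp [hx]))]
      rfl
    case hA =>
      congr 1
      congr 1
      have hdd : c.isDigit = true := hd c (by simp)
      conv_lhs => whnf
      conv_rhs => whnf
      rw [hdd]
      have hdr : ∀ x ∈ rest, x.isDigit = true := fun x hx => hd x (by simp [hx])
      clear hd hsp h1 h2 hdd
      conv_lhs => whnf
      conv_rhs => whnf
      generalize 0 * 10 + (c.toNat - '0'.toNat) = acc
      revert hdr
      induction rest generalizing acc with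
      | nil => intro _; with_unfolding_all rfl
      | cons d r ih =>
        intro hdr
        have hdd : d.isDigit = true := hdr d (by simp)
        conv_lhs => whnf
        conv_rhs => whnf
        rw [hdd]
        exact ih _ (fun x hx => hdr x (by simp [hx]))

-- cast bridge: the Nat digit value equals the Int digit fold
theorem pvVNCast (l : List Char) (acc : Nat) (hd : ∀ c ∈ l, c.isDigit = true) :
    ((pvVN acc l : Nat) : Int) = l.foldl (fun a c => a * 10 + pvDval c) (acc : Int) := by
  induction l generalizing acc with
  | nil => rfl
  | cons c rest ih =>
    have h48 : 48 ≤ c.toNat := pvDigitGe48 c (hd c (by simp))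
    simp only [pvVN, List.foldl_cons] at *
    rw [ih _ (fun x hx => hd x (by simp [hx]))]
    congr 1
    simp only [pvDval]
    push_cast [h48]
    ring

theorem pvOfCharsVI (l : List Char) (hne : l ≠ []) (hd : ∀ c ∈ l, c.isDigit = true) :
    PySem.Int.ofChars? l = some (pvVI l) := by
  cases l with
  | nil => exact absurd rfl hne
  | cons c rest =>
    rw [pvOfCharsDigits c rest hd, pvVNCast _ _ hd]
    rfl

theorem pvFoldShift (l : List Char) (a : Int) :
    l.foldl (fun x c => x * 10 + pvDval c) a = a * 10 ^ l.length + pvVI l := by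
  induction l generalizing a with
  | nil => simp [pvVI]
  | cons c rest ih =>
    simp only [List.foldl_cons, pvVI, List.length_cons]
    rw [ih, ih (0 * 10 + pvDval c)]
    ring

theorem pvVISnoc (l : List Char) (c : Char) :
    pvVI (l ++ [c]) = pvVI l * 10 + pvDval c := by
  simp [pvVI, List.foldl_append]

-- the sliding-window recurrence
theorem pvWinRec (s : List Char) (K j : Nat) (hK : 1 ≤ K) (hjk : j + K + 1 ≤ s.length) :
    (pvVI (pvWin s K j) - pvDval (s.getD j ' ') * 10 ^ (K - 1)) * 10 + pvDval (s.getD (j + K) ' ')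
      = pvVI (pvWin s K (j + 1)) := by
  have hj : j < s.length := by omega
  have hjK : j + K < s.length := by omega
  have hdropj : s.drop j = s.getD j ' ' :: s.drop (j + 1) := by
    rw [List.getD_eq_getElem s ' ' hj]
    rw [List.drop_eq_getElem_cons hj]
  have hlen : K - 1 < (s.drop (j + 1)).length := by
    rw [List.length_drop]; omega
  have hwin1 : pvWin s K (j + 1) = (s.drop (j + 1)).take (K - 1) ++ [s.getD (j + K) ' '] := by
    unfold pvWin
    have : K = (K - 1) + 1 := by omega
    rw [this, List.take_add_one, List.getElem?_eq_getElem hlen]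
    congr 1
    simp only [List.getElem_drop, Option.toList_some]
    rw [List.getD_eq_getElem s ' ' (show j + (K - 1 + 1) < s.length by omega)]
    exact congrArg (fun z => [z]) (pvGetCongr s (by omega) _ _)
  have hwin0 : pvWin s K j = s.getD j ' ' :: (s.drop (j + 1)).take (K - 1) := by
    unfold pvWin
    rw [hdropj]
    have : K = (K - 1) + 1 := by omega
    rw [this]
    rfl
  have hlen' : ((s.drop (j + 1)).take (K - 1)).length = K - 1 := by
    rw [List.length_take]; omega
  rw [hwin0, hwin1, pvVISnoc]
  simp only [pvVI, List.foldl_cons]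
  rw [pvFoldShift, hlen']
  simp only [pvVI]
  ring

-- pyRange with step 1 and integer bounds is a mapped List.range
theorem pvPyRangeOne (a b : Int) :
    PySem.List.pyRange a b 1 = (List.range (b - a).toNat).map (fun (t : Nat) => a + (t : Int)) := by
  simp only [PySem.List.pyRange]
  split
  · omega
  · split
    · split
      · have hc : ((b - a + 1 - 1) / 1).toNat = (b - a).toNat := by norm_num
        rw [hc]
        exact List.map_congr_left (fun t ht => by rw [one_mul])
      · rename_i h
        have hz : (b - a).toNat = 0 := by omega
        rw [hz]
        rfl
    · omega

-- all characters of str(num) are decimal digits when num ≥ 0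
theorem pvToCharsDigits (num : Int) (hnum : 0 ≤ num) :
    ∀ c ∈ PySem.Int.toChars num, c.isDigit = true := by
  intro c hc
  rw [PySem.Int.toChars, if_neg (by omega)] at hc
  exact Nat.isDigit_of_mem_toDigits (by norm_num) (by norm_num) hc

theorem pvWinDigits (num : Int) (hnum : 0 ≤ num) (K t : Nat) :
    ∀ c ∈ pvWin (PySem.Int.toChars num) K t, c.isDigit = true := by
  intro c hc
  exact pvToCharsDigits num hnum c (List.drop_subset _ _ (List.take_subset _ _ hc))

theorem pvWinNe (s : List Char) (K t : Nat) (hK : 1 ≤ K) (ht : t + K ≤ s.length) :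
    pvWin s K t ≠ [] := by
  have : (pvWin s K t).length = K := by
    unfold pvWin
    rw [List.length_take, List.length_drop]
    omega
  intro h
  rw [h] at this
  simp at this
  omega

def pvCount (num k : Int) : Int :=
  ((List.range ((((PySem.Int.toChars num).length : Int) - k + 1).toNat)).countP
    (pvP num (PySem.Int.toChars num) k.toNat) : Int)

theorem pvASide (num k : Int) (hnum : 0 ≤ num) (hk : 1 ≤ k) :
    divisorSubstrings num k = pvCount num k := by
  have hs : (PySem.Int.toStr num).toList = PySem.Int.toChars num := PySem.Int.toList_toStr num
  have hkK : ((k.toNat : Int)) = k := Int.toNat_of_nonneg (by omega)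
  simp only [divisorSubstrings, PySem.Str.len, hs]
  rw [pvPyRangeOne]
  rw [List.foldl_map]
  rw [PySem.List.foldl_congr_mem _ _
    (fun (ret : Int) (t : Nat) => if pvP num (PySem.Int.toChars num) k.toNat t = true then ret + 1 else ret) _
    ?_]
  · rw [PySem.List.foldl_if_add_one]
    rw [zero_add]
    rw [pvCount]
    norm_num
  · intro acc t ht
    rw [List.mem_range] at ht
    have htn : (t : Int) + k ≤ (PySem.Int.toChars num).length := by omega
    have htn' : t + k.toNat ≤ (PySem.Int.toChars num).length := by omega
    -- reduce the slice to the window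
    have hslice : PySem.Str.slice (PySem.Int.toStr num) (some (0 + (t : Int)))
        (some (0 + (t : Int) + k)) = String.ofList (pvWin (PySem.Int.toChars num) k.toNat t) := by
      rw [PySem.Str.slice, PySem.Chars.slice_eq_listSlice, hs]
      simp only [PySem.List.slice, zero_add]
      rw [PySem.List.clampIdx_of_nonneg_of_le (by omega) (by omega)]
      rw [PySem.List.clampIdx_of_nonneg_of_le (by omega) (by omega)]
      have h1 : ((t : Int)).toNat = t := by omega
      have h2 : ((t : Int) + k).toNat = t + k.toNat := by omega
      rw [h1, h2]
      unfold pvWin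
      have h3 : t + k.toNat - t = k.toNat := by omega
      rw [h3]
    rw [hslice, PySem.Int.ofStr?_ofList,
      pvOfCharsVI _ (pvWinNe _ _ _ (by omega) htn') (pvWinDigits num hnum _ _)]
    simp only [pvP]
    by_cases hcond : pvVI (pvWin (PySem.Int.toChars num) k.toNat t) ≠ 0 ∧
        PySem.Int.mod num (pvVI (pvWin (PySem.Int.toChars num) k.toNat t)) = 0
    · rw [if_pos hcond, if_pos (by simpa using hcond)]
    · rw [if_neg hcond, if_neg (by simpa using hcond)]

-- abstract form of B's loop body, indexed by the absolute window start
def pvF (num : Int) (s : List Char) (K : Nat) (st : Int × Int) (a : Nat) : Int × Int :=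
  let cur := (st.2 - pvDval (s.getD a ' ') * 10 ^ (K - 1)) * 10 + pvDval (s.getD (a + K) ' ')
  (if cur ≠ 0 ∧ PySem.Int.mod num cur = 0 then st.1 + 1 else st.1, cur)

theorem pvLoop (num : Int) (s : List Char) (K : Nat) (hK : 1 ≤ K) :
    ∀ (m j : Nat) (r : Int), j + K + m = s.length →
      (((List.range m).map (fun t => j + t)).foldl (pvF num s K) (r, pvVI (pvWin s K j))).1
        = r + ((List.range m).countP (fun t => pvP num s K (j + 1 + t)) : Int) := by
  intro m
  induction m with
  | zero => intro j r _; simp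
  | succ m ih =>
    intro j r hlen
    rw [List.range_succ_eq_map, List.map_cons, List.map_map]
    have hmap : ((fun t => j + t) ∘ Nat.succ) = (fun t => (j + 1) + t) := by
      funext t
      simp [Nat.succ_eq_add_one]
      omega
    rw [hmap, List.foldl_cons]
    have hcur : (pvF num s K (r, pvVI (pvWin s K j)) (j + 0)).2 = pvVI (pvWin s K (j + 1)) := by
      simp only [pvF, Nat.add_zero]
      exact pvWinRec s K j hK (by omega)
    have hfst : (pvF num s K (r, pvVI (pvWin s K j)) (j + 0)).1
        = r + (if pvP num s K (j + 1) = true then 1 else 0 : Int) := by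
      simp only [pvF, Nat.add_zero, pvP]
      rw [pvWinRec s K j hK (by omega)]
      by_cases hcond : pvVI (pvWin s K (j + 1)) ≠ 0 ∧
          PySem.Int.mod num (pvVI (pvWin s K (j + 1))) = 0
      · rw [if_pos hcond, if_pos (by simpa using hcond)]
      · rw [if_neg hcond, if_neg (by simpa using hcond), add_zero]
    have hpair : pvF num s K (r, pvVI (pvWin s K j)) (j + 0)
        = (r + (if pvP num s K (j + 1) = true then 1 else 0 : Int), pvVI (pvWin s K (j + 1))) := by
      rw [Prod.ext_iff]
      exact ⟨hfst, hcur⟩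
    rw [hpair]
    rw [ih (j + 1) _ (by omega)]
    rw [List.countP_cons, List.countP_map]
    have hcnt : (List.countP ((fun t => pvP num s K (j + 1 + t)) ∘ Nat.succ) (List.range m))
        = List.countP (fun t => pvP num s K (j + 1 + 1 + t)) (List.range m) := by
      apply List.countP_congr
      intro x hx
      have : j + 1 + Nat.succ x = j + 1 + 1 + x := by omega
      simp [Function.comp, this]
    rw [hcnt]
    push_cast
    by_cases hp : pvP num s K (j + 1) = true
    · simp [hp]
      ring
    · simp [hp]

theorem pvBSide (num k : Int) (hnum : 0 ≤ num) (hk : 1 ≤ k) :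
    divisorSubstrings_alt num k = pvCount num k := by
  have hs : (PySem.Int.toStr num).toList = PySem.Int.toChars num := PySem.Int.toList_toStr num
  have hkK : ((k.toNat : Int)) = k := Int.toNat_of_nonneg (by omega)
  have hdig := pvToCharsDigits num hnum
  have hdigits : (PySem.Int.toStr num).toList.map
      (fun c => (PySem.Int.ofStr? (String.ofList [c])).getD 0)
      = (PySem.Int.toChars num).map pvDval := by
    rw [hs]
    apply List.map_congr_left
    intro c hc
    rw [PySem.Int.ofStr?_ofList, pvOfCharsVI [c] (by simp)
      (by intro x hx
          have hxc : x = c := by simpa using hx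
          rw [hxc]; exact hdig c hc)]
    simp [pvVI]
  simp only [divisorSubstrings_alt, hdigits, List.length_map]
  by_cases hkn : k > ((PySem.Int.toChars num).length : Int)
  · rw [if_pos hkn]
    unfold pvCount
    have hz : (((PySem.Int.toChars num).length : Int) - k + 1).toNat = 0 := by omega
    rw [hz]
    simp
  · rw [if_neg hkn]
    -- abbreviations
    have hKn : k.toNat ≤ (PySem.Int.toChars num).length := by omega
    -- the initial window value
    have hcur0 : (PySem.List.slice ((PySem.Int.toChars num).map pvDval) none (some k)).foldl
        (fun a d => a * 10 + d) 0 = pvVI (pvWin (PySem.Int.toChars num) k.toNat 0) := by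
      simp only [PySem.List.slice, List.length_map]
      rw [PySem.List.clampIdx_of_nonneg_of_le (by omega) (by omega)]
      rw [List.drop_zero, Nat.sub_zero, ← List.map_take, List.foldl_map]
      simp [pvWin, pvVI]
    rw [hcur0]
    -- the power
    have hpow : (k - 1).toNat = k.toNat - 1 := by omega
    rw [hpow]
    -- the loop list
    rw [pvPyRangeOne, List.foldl_map]
    have hM : (((PySem.Int.toChars num).length : Int) - k).toNat
        = (PySem.Int.toChars num).length - k.toNat := by omega
    rw [hM]
    -- convert the body to pvF
    rw [PySem.List.foldl_congr_mem _ _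
      (fun (st : Int × Int) (t : Nat) => pvF num (PySem.Int.toChars num) k.toNat st (0 + t)) _ ?hbody]
    case hbody =>
      intro st t ht
      rw [List.mem_range] at ht
      have htn : t < (PySem.Int.toChars num).length := by omega
      have htKn : t + k.toNat < (PySem.Int.toChars num).length := by omega
      have hi1 : k + (t : Int) - k = (t : Int) := by ring
      have hi2 : k + (t : Int) = ((k.toNat + t : Nat) : Int) := by push_cast; omega
      rw [hi1, hi2, PySem.List.pyGet?_natCast, PySem.List.pyGet?_natCast]
      rw [List.getElem?_map, List.getElem?_map]
      rw [List.getElem?_eq_getElem htn, List.getElem?_eq_getElem (by omega)]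
      simp only [Option.map_some, Option.getD_some]
      simp only [pvF, Nat.zero_add]
      rw [List.getD_eq_getElem _ ' ' htn, List.getD_eq_getElem _ ' ' (by omega)]
      have : t + k.toNat = k.toNat + t := by omega
      congr 2 <;> try rw [pvGetCongr _ this]
    -- apply the loop invariant
    rw [← List.foldl_map]
    rw [pvLoop num (PySem.Int.toChars num) k.toNat (by omega)
      ((PySem.Int.toChars num).length - k.toNat) 0 _ (by omega)]
    -- align with the full count
    unfold pvCount
    have hM1 : (((PySem.Int.toChars num).length : Int) - k + 1).toNat
        = ((PySem.Int.toChars num).length - k.toNat) + 1 := by omega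
    rw [hM1, List.range_succ_eq_map, List.countP_cons, List.countP_map]
    have hcnt : List.countP ((pvP num (PySem.Int.toChars num) k.toNat) ∘ Nat.succ)
        (List.range ((PySem.Int.toChars num).length - k.toNat))
        = List.countP (fun t => pvP num (PySem.Int.toChars num) k.toNat (0 + 1 + t))
        (List.range ((PySem.Int.toChars num).length - k.toNat)) := by
      apply List.countP_congr
      intro x hx
      simp only [Function.comp]
      rw [show Nat.succ x = 0 + 1 + x from by omega]
    rw [hcnt]
    by_cases hp : pvP num (PySem.Int.toChars num) k.toNat 0 = true
    · have hp' : pvVI (pvWin (PySem.Int.toChars num) k.toNat 0) ≠ 0 ∧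
          PySem.Int.mod num (pvVI (pvWin (PySem.Int.toChars num) k.toNat 0)) = 0 := by
        simpa [pvP] using hp
      rw [if_pos hp', hp]
      simp only [if_true]
      push_cast
      ring
    · have hp' : ¬ (pvVI (pvWin (PySem.Int.toChars num) k.toNat 0) ≠ 0 ∧
          PySem.Int.mod num (pvVI (pvWin (PySem.Int.toChars num) k.toNat 0)) = 0) := by
        simpa [pvP] using hp
      rw [if_neg hp']
      simp [hp]

theorem divisorSubstrings_spec : Claim_equal_divisorSubstrings := by
  intro num k hdom hpre
  obtain ⟨hnum, hk⟩ := hpre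
  unfold Spec_divisorSubstrings
  rw [pvASide num k hnum hk, pvBSide num k hnum hk]
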